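-- pv_equiv track=rewrite | github.com/devseunggwan/my-skills | hooks/_hook_utils.py | iter_command_starts
-- ===== SOURCE A (Python) =====
-- SHELL_SEPARATORS = {";", "&&", "||", "|", "&"}
--
-- def iter_command_starts(tokens: list[str]):
--     """Yield argv slices at each command start across shell separators."""
--     start = 0
--     for i, tok in enumerate(tokens):
--         if tok in SHELL_SEPARATORS:
--             if start < i:
--                 yield tokens[start:i]
--             start = i + 1
--     if start < len(tokens):
--         yield tokens[start:]
-- ===== SOURCE B (Python) =====
-- SHELL_SEPARATORS = {";", "&&", "||", "|", "&"}
--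
-- def iter_command_starts(tokens: list[str]):
--     """Yield argv slices at each command start across shell separators."""
--     n = len(tokens)
--     i = 0
--     while i < n:
--         if tokens[i] in SHELL_SEPARATORS:
--             i += 1
--         else:
--             j = i
--             while j < n and tokens[j] not in SHELL_SEPARATORS:
--                 j += 1
--             yield tokens[i:j]
--             i = j
-- ===== Notes on version B (the rewrite author's own statement) =====
-- stated objective: alternative
-- what changed: Replaces A's pending-start-index scan (per-token separator branch plus a trailing flush after the loop) with a groupby-style run scanner: skip separator tokens, and for each non-separator token scan out the whole maximal run and yield it in one step, so no pending start state or post-loop flush exists.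
import Mathlib
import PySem

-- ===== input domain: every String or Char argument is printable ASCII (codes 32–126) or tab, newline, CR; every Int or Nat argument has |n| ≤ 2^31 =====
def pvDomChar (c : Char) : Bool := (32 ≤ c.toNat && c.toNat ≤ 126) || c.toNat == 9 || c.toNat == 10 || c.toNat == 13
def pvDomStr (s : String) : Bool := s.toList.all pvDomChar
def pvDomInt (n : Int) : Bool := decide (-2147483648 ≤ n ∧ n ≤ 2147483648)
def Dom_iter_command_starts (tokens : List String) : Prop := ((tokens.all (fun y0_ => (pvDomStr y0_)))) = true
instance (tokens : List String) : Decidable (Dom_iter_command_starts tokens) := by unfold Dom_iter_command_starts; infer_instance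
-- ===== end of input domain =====

-- B replaces A's pending-start-index scan with a groupby-style run scanner (skip separators,
-- yield each maximal non-separator run whole); objective: alternative decomposition, same cost.
-- Both Pythons are generators; equivalence is about the list of yielded values.

-- ===== PORT A =====
-- tok in SHELL_SEPARATORS
def isShellSep (t : String) : Bool := t == ";" || t == "&&" || t == "||" || t == "|" || t == "&"

-- the 'for i, tok in enumerate(tokens)' loop carrying (i, start), then the trailing flush
def iterA_go (tokens : List String) : List String → Nat → Nat → List (List String)
  | [], _, start =>
      if start < tokens.length then [PySem.List.slice tokens (some (start : Int)) none] else []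
  | tok :: rest, i, start =>
      if isShellSep tok then
        (if start < i then [PySem.List.slice tokens (some (start : Int)) (some (i : Int))] else [])
          ++ iterA_go tokens rest (i + 1) (i + 1)
      else
        iterA_go tokens rest (i + 1) start

def iter_command_starts (tokens : List String) : List (List String) :=
  iterA_go tokens tokens 0 0

-- ===== PORT B =====
-- run scanner from Source B: skip a separator token, else take the whole maximal
-- non-separator run (the inner 'while j < n and not sep' scan) and yield it
def iterB_go : List String → List (List String)
  | [] => []
  | t :: ts =>
      if isShellSep t then iterB_go ts
      else (t :: ts.takeWhile (fun x => !isShellSep x))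
            :: iterB_go (ts.dropWhile (fun x => !isShellSep x))
  termination_by l => l.length
  decreasing_by
  · simp
  · have := List.length_dropWhile_le (fun x => !isShellSep x) ts
    simp; omega

def iter_command_starts_alt (tokens : List String) : List (List String) :=
  iterB_go tokens

-- ===== PRECONDITION & SPEC =====
def Spec_iter_command_starts (tokens : List String) (out : List (List String)) : Prop := out = iter_command_starts_alt tokens
instance (tokens : List String) (out : List (List String)) : Decidable (Spec_iter_command_starts tokens out) := by unfold Spec_iter_command_starts; infer_instance

-- ===== CLAIM (what is proved, stated in full; the proofs are below) =====
def Claim_equal_iter_command_starts : Prop := ∀ (tokens : List String), Dom_iter_command_starts tokens → Spec_iter_command_starts tokens (iter_command_starts tokens)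

-- ===== LEMMAS AND PROOFS =====

theorem takeWhile_append_of_all {α : Type} (p : α → Bool) (seg l : List α)
    (h : ∀ x ∈ seg, p x = true) :
    (seg ++ l).takeWhile p = seg ++ l.takeWhile p := by
  induction seg with
  | nil => simp
  | cons a s ih =>
      simp only [List.cons_append, List.takeWhile_cons, h a (by simp)]
      simp [ih (fun x hx => h x (by simp [hx]))]

theorem dropWhile_append_of_all {α : Type} (p : α → Bool) (seg l : List α)
    (h : ∀ x ∈ seg, p x = true) :
    (seg ++ l).dropWhile p = l.dropWhile p := by
  induction seg with
  | nil => simp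
  | cons a s ih =>
      simp only [List.cons_append, List.dropWhile_cons, h a (by simp)]
      simp [ih (fun x hx => h x (by simp [hx]))]

-- B on a nonempty non-separator run followed by l: yield the run glued with l's prefix
theorem iterB_go_run (t : String) (ts l : List String)
    (h : ∀ x ∈ t :: ts, isShellSep x = false) :
    iterB_go ((t :: ts) ++ l) =
      (t :: (ts ++ l.takeWhile (fun x => !isShellSep x)))
        :: iterB_go (l.dropWhile (fun x => !isShellSep x)) := by
  rw [List.cons_append, iterB_go]
  rw [if_neg (by simp [h t (by simp)])]
  rw [takeWhile_append_of_all _ ts l (fun x hx => by simp [h x (by simp [hx])]),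
      dropWhile_append_of_all _ ts l (fun x hx => by simp [h x (by simp [hx])])]

theorem iterB_go_sep_cons (tok : String) (l : List String) (h : isShellSep tok = true) :
    iterB_go (tok :: l) = iterB_go l := by
  rw [iterB_go, if_pos h]

-- main invariant: A's loop state (remaining, i, start) versus B on the pending run ++ remaining
theorem main_lemma (tokens : List String) :
    ∀ (rest : List String) (i start : Nat), start ≤ i → rest = tokens.drop i →
      (∀ x ∈ (tokens.drop start).take (i - start), isShellSep x = false) →
      iterA_go tokens rest i start =
        iterB_go ((tokens.drop start).take (i - start) ++ rest) := by
  intro rest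
  induction rest with
  | nil =>
      intro i start hsi hdrop hns
      have hlen : tokens.length ≤ i := by
        by_contra hc
        have : tokens.drop i ≠ [] := by
          simp [List.drop_eq_nil_iff]; omega
        exact this hdrop.symm
      have hseg : (tokens.drop start).take (i - start) = tokens.drop start := by
        apply List.take_of_length_le
        simp; omega
      rw [hseg] at hns ⊢
      simp only [iterA_go, List.append_nil]
      rw [PySem.List.slice_from_natCast]
      by_cases hlt : start < tokens.length
      · rw [if_pos hlt]
        obtain ⟨t, ts, hts⟩ : ∃ t ts, tokens.drop start = t :: ts := by
          cases h : tokens.drop start with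
          | nil => exact absurd h (by simp [List.drop_eq_nil_iff]; omega)
          | cons t ts => exact ⟨t, ts, rfl⟩
        rw [hts] at hns ⊢
        have := iterB_go_run t ts [] hns
        simpa [iterB_go] using this.symm
      · rw [if_neg hlt]
        have : tokens.drop start = [] := by simp [List.drop_eq_nil_iff]; omega
        simp [this, iterB_go]
  | cons tok rest' ih =>
      intro i start hsi hdrop hns
      have hi : i < tokens.length := by
        by_contra hc
        have : tokens.drop i = [] := by simp [List.drop_eq_nil_iff]; omega
        simp [this] at hdrop
      have htok : tokens[i]? = some tok := by
        have : (tokens.drop i)[0]? = some tok := by rw [← hdrop]; rfl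
        simpa [List.getElem?_drop] using this
      have hrest' : rest' = tokens.drop (i + 1) := by
        have : (tokens.drop i).drop 1 = tokens.drop (i + 1) := by
          rw [List.drop_drop]
        rw [← this, ← hdrop]; rfl
      have hsegrest : (tokens.drop start).take (i - start) ++ (tok :: rest') =
          tokens.drop start := by
        rw [hdrop]
        have h1 : tokens.drop i = (tokens.drop start).drop (i - start) := by
          rw [List.drop_drop]; congr 1; omega
        rw [h1, List.take_append_drop]
      simp only [iterA_go]
      by_cases hsep : isShellSep tok
      · rw [if_pos hsep]
        have hihr := ih (i + 1) (i + 1) (le_refl _) hrest' (by simp)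
        simp only [Nat.sub_self, List.take_zero, List.nil_append] at hihr
        rw [hihr]
        by_cases hlt : start < i
        · rw [if_pos hlt]
          obtain ⟨t, ts, hts⟩ : ∃ t ts,
              (tokens.drop start).take (i - start) = t :: ts := by
            cases h : (tokens.drop start).take (i - start) with
            | nil =>
                exfalso
                have : ((tokens.drop start).take (i - start)).length = 0 := by simp [h]
                simp at this; omega
            | cons t ts => exact ⟨t, ts, rfl⟩
          rw [hts] at hns
          rw [PySem.List.slice_natCast, hts]
          rw [iterB_go_run t ts (tok :: rest') hns]
          have hq : (fun x => !isShellSep x) tok = false := by simp [hsep]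
          rw [List.takeWhile_cons, List.dropWhile_cons]
          simp only [hq, Bool.false_eq_true, if_false]
          rw [iterB_go_sep_cons tok rest' hsep]
          simp
        · rw [if_neg hlt]
          have hz : i - start = 0 := by omega
          rw [hz]
          simp [iterB_go_sep_cons tok rest' hsep]
      · rw [if_neg hsep]
        have hsucc : (tokens.drop start).take (i + 1 - start) =
            (tokens.drop start).take (i - start) ++ [tok] := by
          have h1 : i + 1 - start = (i - start) + 1 := by omega
          rw [h1, List.take_add_one]
          congr 1
          have : (tokens.drop start)[i - start]? = some tok := by
            rw [List.getElem?_drop]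
            have : start + (i - start) = i := by omega
            rw [this, htok]
          simp [this]
        have hns' : ∀ x ∈ (tokens.drop start).take (i + 1 - start),
            isShellSep x = false := by
          rw [hsucc]
          intro x hx
          rcases List.mem_append.mp hx with h | h
          · exact hns x h
          · simp at h; subst h; simpa using hsep
        have hih := ih (i + 1) start (by omega) hrest' hns'
        rw [hih, hsucc]
        simp

-- ===== VERDICT (by name: the statement is the Claim_ definition above) =====
theorem iter_command_starts_spec : Claim_equal_iter_command_starts := by
  intro tokens _
  unfold Spec_iter_command_starts iter_command_starts iter_command_starts_alt
  have := main_lemma tokens tokens 0 0 (le_refl _) (by simp) (by simp)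
  simpa using this
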